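-- pv_equiv track=rewrite | github.com/SahibKazimli/LaunchSafe | backend/core/finding_files.py | find_file_content
-- ===== SOURCE A (Python) =====
-- def normalize_path_hint(location: str) -> str:
--     """Strip noise, unify slashes, and drop trailing :line when line is numeric."""
--     loc = (location or "").strip().replace("\\", "/")
--     if not loc or loc.startswith("—") or "absent" in loc.lower():
--         return ""
--     if ":" in loc:
--         _base, _sep, last = loc.rpartition(":")
--         if last.isdigit():
--             loc = _base.strip()
--     return loc.strip()
--
-- def find_file_content(path: str, files: dict[str, str]) -> tuple[str, str]:
--     """Find file content by path, handling zip root prefixes and varying slashes."""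
--     path = normalize_path_hint(path) if path else ""
--     if not path:
--         return "", ""
--     if path in files:
--         return path, files[path]
--
--     path_suffix = "/" + path.lstrip("/")
--     for file_key, file_content in files.items():
--         if ("/" + file_key).endswith(path_suffix) or path_suffix.endswith("/" + file_key):
--             return file_key, file_content
--
--     path_lower = path_suffix.lower()
--     for file_key, file_content in files.items():
--         if ("/" + file_key).lower().endswith(path_lower):
--             return file_key, file_content
--
--     return path, ""
-- ===== SOURCE B (Python) =====
-- def normalize_path_hint(location: str) -> str:
--     """Strip noise, unify slashes, and drop trailing :line when line is numeric."""
--     loc = (location or "").strip().replace("\\", "/")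
--     if not loc or loc.startswith("—") or "absent" in loc.lower():
--         return ""
--     if ":" in loc:
--         _base, _sep, last = loc.rpartition(":")
--         if last.isdigit():
--             loc = _base.strip()
--     return loc.strip()
--
-- def find_file_content(path: str, files: dict[str, str]) -> tuple[str, str]:
--     """Single pass: return on a case-sensitive suffix match, remember the first
--     case-insensitive match as a deferred fallback."""
--     path = normalize_path_hint(path) if path else ""
--     if not path:
--         return "", ""
--     if path in files:
--         return path, files[path]
--
--     path_suffix = "/" + path.lstrip("/")
--     path_lower = path_suffix.lower()
--     fallback = None
--     for file_key, file_content in files.items():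
--         slashed = "/" + file_key
--         if slashed.endswith(path_suffix) or path_suffix.endswith(slashed):
--             return file_key, file_content
--         if fallback is None and slashed.lower().endswith(path_lower):
--             fallback = (file_key, file_content)
--     return fallback if fallback is not None else (path, "")
-- ===== Notes on version B (the rewrite author's own statement) =====
-- stated objective: alternative
-- what changed: A's two sequential full scans over the dict (case-sensitive loop, then a separate case-insensitive loop) are fused into one pass that returns immediately on a case-sensitive suffix match and carries the first case-insensitive match as a deferred fallback used only after the loop.
import Mathlib
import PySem

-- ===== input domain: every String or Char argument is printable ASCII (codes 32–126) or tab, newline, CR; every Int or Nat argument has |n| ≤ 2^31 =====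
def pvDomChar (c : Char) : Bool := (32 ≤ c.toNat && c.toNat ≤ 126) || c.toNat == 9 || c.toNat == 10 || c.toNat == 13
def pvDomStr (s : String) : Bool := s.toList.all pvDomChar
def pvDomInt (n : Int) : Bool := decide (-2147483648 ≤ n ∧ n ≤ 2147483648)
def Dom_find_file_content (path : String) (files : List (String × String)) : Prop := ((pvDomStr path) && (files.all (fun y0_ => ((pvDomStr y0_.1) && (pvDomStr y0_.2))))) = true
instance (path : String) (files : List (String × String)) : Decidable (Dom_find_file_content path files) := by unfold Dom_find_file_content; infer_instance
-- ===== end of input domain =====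

-- B replaces A's two separate full scans over the dict by ONE pass that returns on a
-- case-sensitive suffix match and carries the first case-insensitive match as a deferred
-- fallback (objective: alternative decomposition; same asymptotic cost).

-- ===== PORT A =====

-- shared helper: normalize_path_hint (both Pythons use the identical helper)
def pvNormalize (location : String) : List Char :=
  let loc := PySem.Chars.replace (PySem.Chars.strip location.toList) ['\\'] ['/']
  if loc = [] ∨ PySem.Chars.startswith loc ['—'] ∨
      PySem.Chars.isIn "absent".toList (PySem.Chars.lower loc) then []
  else
    let loc2 :=
      if PySem.Chars.isIn [':'] loc then
        -- loc.rpartition(":"): split at the LAST ':' (exact here since ':' occurs in loc)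
        let i := (PySem.Chars.rfind loc [':']).toNat
        let base := loc.take i
        let last := loc.drop (i + 1)
        if PySem.Chars.strIsdigit last then PySem.Chars.strip base else loc
      else loc
    PySem.Chars.strip loc2

-- the two match conditions of A's two loops (B reuses the same conditions)
def pvCond1 (pSuffix : List Char) (key : String) : Bool :=
  PySem.Chars.endswith ('/' :: key.toList) pSuffix ||
  PySem.Chars.endswith pSuffix ('/' :: key.toList)

def pvCond2 (pLower : List Char) (key : String) : Bool :=
  PySem.Chars.endswith (PySem.Chars.lower ('/' :: key.toList)) pLower

def find_file_content (path : String) (files : List (String × String)) : String × String :=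
  let p := if path ≠ "" then pvNormalize path else []
  if p = [] then ("", "")
  else
    -- `path in files` / `files[path]`: first matching key of the association list
    match files.find? (fun kv => kv.1.toList == p) with
    | some kv => (String.mk p, kv.2)
    | none =>
      -- path.lstrip("/"): drop leading '/' characters (exact)
      let pSuffix := '/' :: p.dropWhile (· == '/')
      match files.find? (fun kv => pvCond1 pSuffix kv.1) with   -- first loop: return on first match
      | some kv => kv
      | none =>
        let pLower := PySem.Chars.lower pSuffix
        match files.find? (fun kv => pvCond2 pLower kv.1) with  -- second loop
        | some kv => kv
        | none => (String.mk p, "")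

-- ===== PORT B =====

-- B's single pass: return on a case-sensitive match, remember the first case-insensitive
-- match in `fb` and use it only after the loop.
def pvLoopB (pSuffix pLower : List Char) (pS : String) :
    List (String × String) → Option (String × String) → String × String
  | [], fb => fb.getD (pS, "")
  | kv :: rest, fb =>
    if pvCond1 pSuffix kv.1 then kv
    else if fb.isNone && pvCond2 pLower kv.1 then pvLoopB pSuffix pLower pS rest (some kv)
    else pvLoopB pSuffix pLower pS rest fb

def find_file_content_alt (path : String) (files : List (String × String)) : String × String :=
  let p := if path ≠ "" then pvNormalize path else []
  if p = [] then ("", "")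
  else
    match files.find? (fun kv => kv.1.toList == p) with
    | some kv => (String.mk p, kv.2)
    | none =>
      let pSuffix := '/' :: p.dropWhile (· == '/')
      let pLower := PySem.Chars.lower pSuffix
      pvLoopB pSuffix pLower (String.mk p) files none

-- ===== PRECONDITION & SPEC =====
def Spec_find_file_content (path : String) (files : List (String × String)) (out : String × String) : Prop := out = find_file_content_alt path files
instance (path : String) (files : List (String × String)) (out : String × String) : Decidable (Spec_find_file_content path files out) := by unfold Spec_find_file_content; infer_instance

-- ===== CLAIM (what is proved, stated in full; the proofs are below) =====
def Claim_equal_find_file_content : Prop := ∀ (path : String) (files : List (String × String)), Dom_find_file_content path files → Spec_find_file_content path files (find_file_content path files)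

-- ===== LEMMAS AND PROOFS =====

-- B's deferred-fallback loop equals A's two sequential first-match scans.
theorem pvLoopB_eq (pSuffix pLower : List Char) (pS : String) :
    ∀ (files : List (String × String)) (fb : Option (String × String)),
      pvLoopB pSuffix pLower pS files fb =
        match files.find? (fun kv => pvCond1 pSuffix kv.1) with
        | some kv => kv
        | none =>
          match fb with
          | some f => f
          | none =>
            match files.find? (fun kv => pvCond2 pLower kv.1) with
            | some kv => kv
            | none => (pS, "")
  | [], fb => by cases fb <;> rfl
  | kv :: rest, fb => by
    by_cases h1 : pvCond1 pSuffix kv.1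
    · simp [pvLoopB, List.find?, h1]
    · by_cases h2 : pvCond2 pLower kv.1
      · cases fb with
        | none =>
          simp [pvLoopB, List.find?, h1, h2, pvLoopB_eq pSuffix pLower pS rest (some kv)]
        | some f =>
          simp [pvLoopB, List.find?, h1, h2, pvLoopB_eq pSuffix pLower pS rest (some f)]
      · cases fb <;>
          simp [pvLoopB, List.find?, h1, h2, pvLoopB_eq pSuffix pLower pS rest]

-- ===== VERDICT (by name: the statement is the Claim_ definition above) =====
theorem find_file_content_spec : Claim_equal_find_file_content := by
  intro path files _
  show find_file_content path files = find_file_content_alt path files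
  simp only [find_file_content, find_file_content_alt, pvLoopB_eq]
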